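-- pv_equiv track=rewrite | github.com/pixelchai/SongTitleParser | mldev.py | char_embed
-- ===== SOURCE A (Python) =====
-- import unicodedata
--
-- def char_embed(char: str):
--     """
--     Number from 0-16 representing class
--     """
--     ret = 0
--     # space
--     if char.isspace(): return ret
--     else: ret += 1
--
--     list_classes = [
--         '"', # quote
--         "'", # apostrophe or quote
--         "+&", # plus or ampersand
--         "/／", # slash
--         ".。", # dot/fullstop
--         ",", # comma
--     ]
--
--     for char_class in list_classes:
--         if char in char_class:
--             return ret
--         else:
--             ret += 1
--
--     cat = unicodedata.category(char)
--     if char in "([『「（【［<{" or cat == "Ps": return ret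
--     else: ret += 1
--     if char in ")]』」）】］>}" or cat == "Pe": return ret
--     else: ret += 1
--     if char in "-__—" or cat == "Pd": return ret
--     else: ret += 1
--     if cat.startswith("P"): return ret
--     else: ret += 1
--
--     if cat == "Lu": return ret
--     else: ret += 1
--     if cat == "Ll": return ret
--     else: ret += 1
--     # NB: no explicit class for Lo
--     if cat.startswith("L"): return ret
--     else: ret += 1
--
--     if cat.startswith("N"): return ret
--     else: ret += 1
--     if cat.startswith("S"): return ret
--     else: ret += 1
--
--     return ret
-- ===== SOURCE B (Python) =====
-- # Table-driven reimplementation: one precomputed char -> class map (ASCII), no unicodedata, no counter.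
-- CLASS_CHARS = [
--     '"',                            # 1  quote
--     "'",                            # 2  apostrophe
--     "+&",                           # 3  plus or ampersand
--     "/",                            # 4  slash
--     ".",                            # 5  dot/fullstop
--     ",",                            # 6  comma
--     "([{<",                         # 7  opening bracket
--     ")]}>",                         # 8  closing bracket
--     "-_",                           # 9  dash/underscore
--     "!#%*:;?@\\",                   # 10 other punctuation
--     "ABCDEFGHIJKLMNOPQRSTUVWXYZ",   # 11 uppercase letter
--     "abcdefghijklmnopqrstuvwxyz",   # 12 lowercase letter
--     "",                             # 13 other letter (none in ASCII)
--     "0123456789",                   # 14 digit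
--     "$^`|~=",                       # 15 symbol
-- ]
-- CLASS_OF = {c: i + 1 for i, chars in enumerate(CLASS_CHARS) for c in chars}
--
-- def char_embed(char: str):
--     if char.isspace():
--         return 0
--     return CLASS_OF[char]
-- ===== Notes on version B (the rewrite author's own statement) =====
-- stated objective: simpler
-- what changed: Replaces the incrementing-counter cascade with unicodedata.category calls by one precomputed character-to-class dict built from per-class ASCII character sets: a single hash lookup instead of the branch cascade, no unicodedata, no counter.
-- outside the precondition, e.g. on char_embed(''): A returns 1, B raises KeyError; on char_embed('+&'): A returns 3, B raises KeyError
import Mathlib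
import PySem

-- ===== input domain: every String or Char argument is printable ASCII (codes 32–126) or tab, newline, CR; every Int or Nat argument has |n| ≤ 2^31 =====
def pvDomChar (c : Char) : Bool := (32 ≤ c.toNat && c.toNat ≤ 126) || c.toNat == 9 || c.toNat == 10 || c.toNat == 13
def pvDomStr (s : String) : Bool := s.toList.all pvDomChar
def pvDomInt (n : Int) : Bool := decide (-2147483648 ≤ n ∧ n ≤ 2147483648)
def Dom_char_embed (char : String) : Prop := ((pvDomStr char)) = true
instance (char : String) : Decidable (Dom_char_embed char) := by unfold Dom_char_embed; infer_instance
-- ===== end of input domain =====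

-- B replaces A's counter cascade + unicodedata.category cascade by one ordered table of
-- per-class ASCII character sets (objective: simpler).

-- ===== PORT A =====
-- unicodedata.category, hand-ported: exact for the code points of the stated domain
-- (printable ASCII and tab/newline/CR); nothing is claimed outside it.
def pyCategoryAsciiChar (c : Char) : String :=
  if 65 ≤ c.toNat ∧ c.toNat ≤ 90 then "Lu"
  else if 97 ≤ c.toNat ∧ c.toNat ≤ 122 then "Ll"
  else if 48 ≤ c.toNat ∧ c.toNat ≤ 57 then "Nd"
  else if c = ' ' then "Zs"
  else if c ∈ ['!', '"', '#', '%', '&', '\'', '*', ',', '.', '/', ':', ';', '?', '@', '\\'] then "Po"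
  else if c ∈ ['(', '[', '{'] then "Ps"
  else if c ∈ [')', ']', '}'] then "Pe"
  else if c = '-' then "Pd"
  else if c = '_' then "Pc"
  else if c = '$' then "Sc"
  else if c ∈ ['+', '<', '=', '>', '|', '~'] then "Sm"
  else if c ∈ ['^', '`'] then "Sk"
  else "Cc"

-- unicodedata.category on the argument string: none = TypeError (len(char) ≠ 1)
def pyCategory? (s : String) : Option String :=
  match s.toList with
  | [c] => some (pyCategoryAsciiChar c)
  | _ => none

-- the 'for char_class in list_classes' loop, carrying ret
def char_embed_classLoop : List String → Int → String → Option Int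
  | [], _, _ => none
  | cls :: rest, ret, char =>
      if PySem.Str.isIn char cls then some ret else char_embed_classLoop rest (ret + 1) char

def char_embed (char : String) : Int :=
  if PySem.Str.strIsspace char then 0 else          -- ret = 0 … ret += 1
  match char_embed_classLoop ["\"", "'", "+&", "/／", ".。", ","] 1 char with
  | some ret => ret
  | none =>                                          -- ret = 7 here
    match pyCategory? char with
    | none => 0    -- Python raises TypeError here; such inputs are outside Pre_char_embed
    | some cat =>
      if PySem.Str.isIn char "([『「（【［<{" || cat == "Ps" then 7
      else if PySem.Str.isIn char ")]』」）】］>}" || cat == "Pe" then 8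
      else if PySem.Str.isIn char "-__—" || cat == "Pd" then 9
      else if PySem.Str.startswith cat "P" then 10
      else if cat == "Lu" then 11
      else if cat == "Ll" then 12
      else if PySem.Str.startswith cat "L" then 13
      else if PySem.Str.startswith cat "N" then 14
      else if PySem.Str.startswith cat "S" then 15
      else 16

-- ===== PORT B =====
def bClassChars : List String :=
  ["\"", "'", "+&", "/", ".", ",", "([{<", ")]}>", "-_", "!#%*:;?@\\",
   "ABCDEFGHIJKLMNOPQRSTUVWXYZ", "abcdefghijklmnopqrstuvwxyz", "",
   "0123456789", "$^`|~="]

-- CLASS_OF = {c: i + 1 for i, chars in enumerate(CLASS_CHARS) for c in chars}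
def bClassOf : PySem.Dict String Int :=
  (PySem.List.enumerate bClassChars).foldl
    (fun d p => p.2.toList.foldl (fun d c => d.insert (String.ofList [c]) (p.1 + 1)) d)
    PySem.Dict.empty

def char_embed_alt (char : String) : Int :=
  if PySem.Str.strIsspace char then 0
  else
    match bClassOf.get? char with
    | some v => v
    | none => 0    -- Python raises KeyError here; such inputs are outside Pre_char_embed

-- ===== PRECONDITION & SPEC =====
-- Pre_ keeps single-character and whitespace strings. It excludes the other strings: there A
-- raises TypeError inside unicodedata.category, except "" and "+&", whose early return is an
-- accident of Python's substring membership test on a multi-character argument (B raises KeyError on both).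
def Pre_char_embed (char : String) : Prop :=
  char.toList.length = 1 ∨ PySem.Str.strIsspace char = true
instance (char : String) : Decidable (Pre_char_embed char) := by unfold Pre_char_embed; infer_instance

def pvWitness_char_embed : String := "a"

def Spec_char_embed (char : String) (out : Int) : Prop := out = char_embed_alt char
instance (char : String) (out : Int) : Decidable (Spec_char_embed char out) := by unfold Spec_char_embed; infer_instance

-- ===== CLAIM (what is proved, stated in full; the proofs are below) =====
def Claim_equal_char_embed : Prop := ∀ (char : String), Dom_char_embed char → Pre_char_embed char → Spec_char_embed char (char_embed char)

-- ===== LEMMAS AND PROOFS =====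


-- agreement on every single character of the domain, by evaluation
set_option maxRecDepth 16384 in
theorem char_embed_eq_alt_single : ∀ n : Fin 128, pvDomChar (Char.ofNat n.val) = true →
    char_embed (String.ofList [Char.ofNat n.val]) = char_embed_alt (String.ofList [Char.ofNat n.val]) := by
  decide

-- ===== VERDICT (by name: the statement is the Claim_ definition above) =====
theorem char_embed_spec : Claim_equal_char_embed := by
  intro char hdom hpre
  unfold Spec_char_embed
  by_cases hsp : PySem.Str.strIsspace char = true
  · have hsp' : PySem.Chars.strIsspace char.toList = true := by
      simpa [PySem.Str.strIsspace] using hsp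
    simp [char_embed, char_embed_alt, hsp']
  rcases hpre with hlen | hsp'
  · -- length = 1
    obtain ⟨c, hl⟩ : ∃ c, char.toList = [c] := by
      rcases h : char.toList with _ | ⟨c, _ | ⟨d, rest⟩⟩ <;> simp [h] at hlen ⊢
    have hc : pvDomChar c = true := by
      have := hdom; unfold Dom_char_embed pvDomStr at this
      rw [hl] at this; simpa using this
    have hlt : c.toNat < 128 := by
      unfold pvDomChar at hc
      simp only [Bool.or_eq_true, Bool.and_eq_true, decide_eq_true_eq, beq_iff_eq] at hc
      omega
    have hchar : char = String.ofList [c] := by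
      have := congrArg String.ofList hl
      simpa using this
    have key := char_embed_eq_alt_single ⟨c.toNat, hlt⟩
      (by simpa [Char.ofNat_toNat] using hc)
    simpa [Char.ofNat_toNat, hchar] using key
  · exact absurd hsp' hsp
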